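-- pv_equiv track=rewrite | github.com/Hisham1404/trade_discovery | signal_engine/production_signal_generator.py | _group_signals_by_symbol
-- ===== SOURCE A (Python) =====
-- from typing import Dict, List, Any, Optional
--
-- def _group_signals_by_symbol(signals: List[Dict]) -> Dict[str, List[Dict]]:
--     """Group signals by symbol"""
--     grouped = {}
--     for signal in signals:
--         symbol = signal.get('symbol', 'UNKNOWN')
--         if symbol not in grouped:
--             grouped[symbol] = []
--         grouped[symbol].append(signal)
--     return grouped
-- ===== SOURCE B (Python) =====
-- def _group_signals_by_symbol(signals):
--     """Group signals by symbol: ordered distinct keys first, then one filter per key."""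
--     keys = list(dict.fromkeys(s.get('symbol', 'UNKNOWN') for s in signals))
--     return {k: [s for s in signals if s.get('symbol', 'UNKNOWN') == k] for k in keys}
-- ===== Notes on version B (the rewrite author's own statement) =====
-- stated objective: alternative
-- what changed: Replaces the single-pass dict-accumulation (create-empty-list-then-append per signal) by a two-phase decomposition: first compute the ordered distinct symbols with dict.fromkeys, then build each group with one filter comprehension per symbol.
import Mathlib
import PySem

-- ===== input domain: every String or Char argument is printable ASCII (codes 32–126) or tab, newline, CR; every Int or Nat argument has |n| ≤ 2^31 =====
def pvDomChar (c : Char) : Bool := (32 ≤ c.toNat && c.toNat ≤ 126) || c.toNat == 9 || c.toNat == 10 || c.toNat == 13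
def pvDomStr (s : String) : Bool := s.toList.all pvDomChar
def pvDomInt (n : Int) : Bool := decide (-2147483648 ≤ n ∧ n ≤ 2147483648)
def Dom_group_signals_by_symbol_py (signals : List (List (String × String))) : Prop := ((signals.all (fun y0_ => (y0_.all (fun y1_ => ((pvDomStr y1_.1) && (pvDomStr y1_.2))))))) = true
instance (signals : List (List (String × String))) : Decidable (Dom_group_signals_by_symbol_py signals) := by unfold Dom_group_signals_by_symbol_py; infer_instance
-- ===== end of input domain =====

-- B replaces A's single-pass dict accumulation by "ordered distinct keys, then one filter per key" (alternative decomposition; equal return value, not faster).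


-- signal.get('symbol', 'UNKNOWN')  (both Pythons use this expression verbatim)
def sigKey (signal : List (String × String)) : String :=
  (PySem.Dict.mk signal).getD "symbol" "UNKNOWN"

-- ===== PORT A =====
-- grouped = {}; for signal in signals: symbol = signal.get('symbol','UNKNOWN');
--   if symbol not in grouped: grouped[symbol] = []
--   grouped[symbol].append(signal)
-- return grouped
def group_signals_by_symbol_py (signals : List (List (String × String))) : List (String × List (List (String × String))) :=
  (signals.foldl
    (fun grouped signal =>
      let symbol := sigKey signal
      let grouped := if grouped.contains symbol then grouped else grouped.insert symbol []
      grouped.modify symbol [] (· ++ [signal]))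
    PySem.Dict.empty).items

-- ===== PORT B =====
-- keys = list(dict.fromkeys(s.get('symbol','UNKNOWN') for s in signals))
-- return {k: [s for s in signals if s.get('symbol','UNKNOWN') == k] for k in keys}
def group_signals_by_symbol_py_alt (signals : List (List (String × String))) : List (String × List (List (String × String))) :=
  (PySem.Set.ofList (signals.map sigKey)).map
    (fun k => (k, signals.filter (fun s => sigKey s == k)))

-- ===== PRECONDITION & SPEC =====
def Spec_group_signals_by_symbol_py (signals : List (List (String × String))) (out : List (String × List (List (String × String)))) : Prop := out = group_signals_by_symbol_py_alt signals
instance (signals : List (List (String × String))) (out : List (String × List (List (String × String)))) : Decidable (Spec_group_signals_by_symbol_py signals out) := by unfold Spec_group_signals_by_symbol_py; infer_instance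

-- ===== CLAIM (what is proved, stated in full; the proofs are below) =====
def Claim_equal_group_signals_by_symbol_py : Prop := ∀ (signals : List (List (String × String))), Dom_group_signals_by_symbol_py signals → Spec_group_signals_by_symbol_py signals (group_signals_by_symbol_py signals)

-- ===== LEMMAS AND PROOFS =====

-- A's loop body (contains-guard, then modify) is a plain modify: modify inserts at the end when the key is absent.
theorem stepA_eq_modify (d : PySem.Dict String (List (List (String × String)))) (signal : List (String × String)) :
    (let symbol := sigKey signal
     let d' := if d.contains symbol then d else d.insert symbol []
     d'.modify symbol [] (· ++ [signal]))
    = d.modify (sigKey signal) [] (· ++ [signal]) := by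
  by_cases h : d.contains (sigKey signal) = true
  · simp [h]
  · simp only [Bool.not_eq_true] at h
    simp only [h, Bool.false_eq_true, if_false]
    simp [PySem.Dict.modify, PySem.Dict.insert_insert_self, PySem.Dict.getD_insert_self,
      PySem.Dict.getD_of_not_contains d ([]) h]

theorem group_signals_by_symbol_py_spec : Claim_equal_group_signals_by_symbol_py := by
  intro signals _
  unfold Spec_group_signals_by_symbol_py group_signals_by_symbol_py group_signals_by_symbol_py_alt
  -- 1. rewrite A's loop into a pure modify-fold
  rw [PySem.List.foldl_congr_mem signals _
        (fun d signal => d.modify (sigKey signal) [] (· ++ [signal])) PySem.Dict.empty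
        (fun acc x _ => stepA_eq_modify acc x)]
  set D := signals.foldl (fun d signal => d.modify (sigKey signal) [] (· ++ [signal]))
      PySem.Dict.empty with hD
  -- 2. its key list is the ordered distinct key list
  have hkeys : D.keys = PySem.Set.ofList (signals.map sigKey) := by
    rw [hD, PySem.Dict.keys_foldl_modify_key signals sigKey [] (fun _ signal v => v ++ [signal])]
    simp [PySem.Set.update_nil_left]
  have hnd : D.keys.Nodup := by
    exact PySem.Dict.nodup_keys_foldl_modify_key signals sigKey []
      (fun _ signal v => v ++ [signal]) PySem.Dict.empty (by simp)
  -- 3. each group is the filter of signals with that key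
  have hgetD : ∀ c, D.getD c [] = signals.filter (fun s => sigKey s == c) := by
    intro c
    have h0 := PySem.Dict.getD_foldl_modify_append
        (signals.map (fun s => (sigKey s, s))) PySem.Dict.empty c
    simp only [List.foldl_map, List.filter_map, Function.comp_def] at h0
    rw [hD]
    simpa [Function.comp_def] using h0
  rw [PySem.Dict.items_eq_map_keys D hnd [], hkeys]
  refine List.map_congr_left (fun k _ => ?_)
  rw [hgetD k]
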